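-- pv_equiv track=rewrite | github.com/PabloRuizCuevas/pep-323 | gcopy/custom_generator.py | has_node
-- ===== SOURCE A (Python) =====
-- def has_node(line,node):
--     """Checks if a node has starting IDs that match"""
--     ID,nodes,checks="",[],node.split()
--     for char in line:
--         ## no strings allowed ##
--         if char=="'" or char=='"':
--             return False
--         if char.isalnum():
--             ID+=char
--         elif char==" ":
--             if ID:
--                 nodes+=[ID]
--                 for node,check in zip(nodes,checks):
--                     if node!=check:
--                         return False
--                 if len(nodes)==len(checks):
--                     return True
--     return False
-- ===== SOURCE B (Python) =====
-- def has_node(line, node):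
--     """Checks if a node has starting IDs that match"""
--     # Phase 1: collect cumulative-ID snapshots up to the first quote.
--     snaps = []
--     ID = ""
--     for char in line:
--         if char == "'" or char == '"':
--             break
--         if char.isalnum():
--             ID += char
--         elif char == " ":
--             if ID:
--                 snaps.append(ID)
--     # Phase 2: prefix comparison.
--     checks = node.split()
--     return bool(checks) and len(snaps) >= len(checks) and snaps[:len(checks)] == checks
-- ===== Notes on version B (the rewrite author's own statement) =====
-- stated objective: simpler
-- what changed: A interleaves scanning with a re-zip of the whole snapshot list against the checks at every space (with early returns); B separates it into one scan that only collects the cumulative-ID snapshots (stopping at the first quote) followed by a single prefix comparison against node.split().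
import Mathlib
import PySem

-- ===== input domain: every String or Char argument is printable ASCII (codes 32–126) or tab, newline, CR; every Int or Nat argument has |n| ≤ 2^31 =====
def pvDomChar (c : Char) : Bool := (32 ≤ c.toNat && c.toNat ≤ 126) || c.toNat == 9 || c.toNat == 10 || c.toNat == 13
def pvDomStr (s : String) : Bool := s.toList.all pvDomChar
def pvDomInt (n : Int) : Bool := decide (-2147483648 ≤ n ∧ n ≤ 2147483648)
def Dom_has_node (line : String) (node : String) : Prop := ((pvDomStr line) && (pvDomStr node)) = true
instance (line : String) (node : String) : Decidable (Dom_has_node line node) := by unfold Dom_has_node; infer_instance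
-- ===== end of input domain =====

-- B replaces A's interleaved scan (re-zipping all snapshots against the checks at every
-- space, with early returns) by a plain collect-snapshots pass followed by one prefix compare.

-- ===== PORT A =====
-- A's for-loop with its early returns, as structural recursion over line's characters;
-- state: the cumulative ID and the snapshot list `nodes`.
def hnLoopA (checks : List String) : List Char → String → List String → Bool
  | [], _, _ => false
  | c :: cs, id, nodes =>
    if c == '\'' || c == '"' then false
    else if PySem.Chars.isalnum c then hnLoopA checks cs (id.push c) nodes
    else if c == ' ' then
      if id ≠ "" then
        let nodes' := nodes ++ [id]
        if (nodes'.zip checks).all (fun p => p.1 == p.2) then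
          if nodes'.length == checks.length then true
          else hnLoopA checks cs id nodes'
        else false
      else hnLoopA checks cs id nodes
    else hnLoopA checks cs id nodes

def has_node (line : String) (node : String) : Bool :=
  hnLoopA (PySem.Str.split₀ node) line.toList "" []

-- ===== PORT B =====
-- Phase 1 of Source B: collect the cumulative-ID snapshots, stopping at the first quote.
def hnSnaps : List Char → String → List String → List String
  | [], _, snaps => snaps
  | c :: cs, id, snaps =>
    if c == '\'' || c == '"' then snaps
    else if PySem.Chars.isalnum c then hnSnaps cs (id.push c) snaps
    else if c == ' ' then
      if id ≠ "" then hnSnaps cs id (snaps ++ [id]) else hnSnaps cs id snaps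
    else hnSnaps cs id snaps

def has_node_alt (line : String) (node : String) : Bool :=
  let checks := PySem.Str.split₀ node
  let snaps := hnSnaps line.toList "" []
  decide (checks ≠ []) && decide (checks.length ≤ snaps.length) &&
    (snaps.take checks.length == checks)

-- ===== PRECONDITION & SPEC =====
def Spec_has_node (line : String) (node : String) (out : Bool) : Prop := out = has_node_alt line node
instance (line : String) (node : String) (out : Bool) : Decidable (Spec_has_node line node out) := by unfold Spec_has_node; infer_instance

-- ===== CLAIM (what is proved, stated in full; the proofs are below) =====
def Claim_equal_has_node : Prop := ∀ (line : String) (node : String), Dom_has_node line node → Spec_has_node line node (has_node line node)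

-- ===== LEMMAS AND PROOFS =====

-- step equations for the two loops (stated separately so rewriting under `decide` is clean)
theorem hnLoopA_quote {c : Char} (checks : List String) (cs : List Char) (id : String)
    (nodes : List String) (h : (c == '\'' || c == '"') = true) :
    hnLoopA checks (c :: cs) id nodes = false := by
  simp [hnLoopA, h]

theorem hnLoopA_alnum {c : Char} (checks : List String) (cs : List Char) (id : String)
    (nodes : List String) (h1 : ¬ (c == '\'' || c == '"') = true)
    (h2 : PySem.Chars.isalnum c = true) :
    hnLoopA checks (c :: cs) id nodes = hnLoopA checks cs (id.push c) nodes := by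
  simp only [hnLoopA]; rw [if_neg h1, if_pos h2]

theorem hnLoopA_space {c : Char} (checks : List String) (cs : List Char) (id : String)
    (nodes : List String) (h1 : ¬ (c == '\'' || c == '"') = true)
    (h2 : ¬ PySem.Chars.isalnum c = true) (h3 : (c == ' ') = true) (h4 : id ≠ "") :
    hnLoopA checks (c :: cs) id nodes =
      (if ((nodes ++ [id]).zip checks).all (fun p => p.1 == p.2) then
        if (nodes ++ [id]).length == checks.length then true
        else hnLoopA checks cs id (nodes ++ [id])
      else false) := by
  simp only [hnLoopA]; rw [if_neg h1, if_neg h2, if_pos h3, if_pos h4]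

theorem hnLoopA_skip {c : Char} (checks : List String) (cs : List Char) (id : String)
    (nodes : List String) (h1 : ¬ (c == '\'' || c == '"') = true)
    (h2 : ¬ PySem.Chars.isalnum c = true)
    (h : ¬ (c == ' ') = true ∨ id = "") :
    hnLoopA checks (c :: cs) id nodes = hnLoopA checks cs id nodes := by
  simp only [hnLoopA]; rw [if_neg h1, if_neg h2]
  rcases h with h3 | h4
  · rw [if_neg h3]
  · by_cases h3 : (c == ' ') = true
    · rw [if_pos h3, if_neg (by simp [h4])]
    · rw [if_neg h3]

theorem hnSnaps_quote {c : Char} (cs : List Char) (id : String) (snaps : List String)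
    (h : (c == '\'' || c == '"') = true) : hnSnaps (c :: cs) id snaps = snaps := by
  simp [hnSnaps, h]

theorem hnSnaps_alnum {c : Char} (cs : List Char) (id : String) (snaps : List String)
    (h1 : ¬ (c == '\'' || c == '"') = true) (h2 : PySem.Chars.isalnum c = true) :
    hnSnaps (c :: cs) id snaps = hnSnaps cs (id.push c) snaps := by
  simp only [hnSnaps]; rw [if_neg h1, if_pos h2]

theorem hnSnaps_space {c : Char} (cs : List Char) (id : String) (snaps : List String)
    (h1 : ¬ (c == '\'' || c == '"') = true) (h2 : ¬ PySem.Chars.isalnum c = true)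
    (h3 : (c == ' ') = true) (h4 : id ≠ "") :
    hnSnaps (c :: cs) id snaps = hnSnaps cs id (snaps ++ [id]) := by
  simp only [hnSnaps]; rw [if_neg h1, if_neg h2, if_pos h3, if_pos h4]

theorem hnSnaps_skip {c : Char} (cs : List Char) (id : String) (snaps : List String)
    (h1 : ¬ (c == '\'' || c == '"') = true) (h2 : ¬ PySem.Chars.isalnum c = true)
    (h : ¬ (c == ' ') = true ∨ id = "") :
    hnSnaps (c :: cs) id snaps = hnSnaps cs id snaps := by
  simp only [hnSnaps]; rw [if_neg h1, if_neg h2]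
  rcases h with h3 | h4
  · rw [if_neg h3]
  · by_cases h3 : (c == ' ') = true
    · rw [if_pos h3, if_neg (by simp [h4])]
    · rw [if_neg h3]

-- the snapshot collector only ever appends to its accumulator
theorem hnSnaps_acc (cs : List Char) : ∀ (id : String) (a b : List String),
    hnSnaps cs id (a ++ b) = a ++ hnSnaps cs id b := by
  induction cs with
  | nil => intro id a b; simp [hnSnaps]
  | cons c cs ih =>
    intro id a b
    simp only [hnSnaps]
    split_ifs with h1 h2 h3 h4
    · rfl
    · exact ih _ _ _
    · rw [List.append_assoc]; exact ih _ _ _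
    · exact ih _ _ _
    · exact ih _ _ _

theorem zipAll_cancel (pre : List String) (xs ys : List String) :
    ((pre ++ xs).zip (pre ++ ys)).all (fun p => p.1 == p.2)
      = (xs.zip ys).all (fun p => p.1 == p.2) := by
  induction pre with
  | nil => rfl
  | cons p pre ih => simp [ih]

-- A with an empty check list never returns True
theorem hnLoopA_nil (cs : List Char) : ∀ (id : String) (nodes : List String),
    hnLoopA [] cs id nodes = false := by
  induction cs with
  | nil => intro id nodes; simp [hnLoopA]
  | cons c cs ih =>
    intro id nodes
    simp only [hnLoopA]
    split_ifs <;> first | rfl | exact ih _ _ | simp_all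

-- B's final verdict on the final snapshot list, as a Bool expression
-- main invariant: if the snapshots so far (`nodes`) form a strict matching prefix of the
-- checks, A's remaining loop decides exactly B's prefix comparison on the final snapshots
theorem hnLoop_key (cs : List Char) : ∀ (id : String) (nodes suf : List String), suf ≠ [] →
    hnLoopA (nodes ++ suf) cs id nodes
      = (decide ((nodes ++ suf).length ≤ (hnSnaps cs id nodes).length) &&
         ((hnSnaps cs id nodes).take (nodes ++ suf).length == nodes ++ suf)) := by
  induction cs with
  | nil =>
    intro id nodes suf hsuf
    have hp : 0 < suf.length := List.length_pos_of_ne_nil hsuf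
    have hlt : ¬ ((nodes ++ suf).length ≤ (hnSnaps [] id nodes).length) := by
      simp only [hnSnaps, List.length_append]; omega
    simp only [hnLoopA, decide_eq_false hlt, Bool.false_and]
  | cons c cs ih =>
    intro id nodes suf hsuf
    have hp : 0 < suf.length := List.length_pos_of_ne_nil hsuf
    by_cases h1 : (c == '\'' || c == '"') = true
    · rw [hnLoopA_quote _ _ _ _ h1]
      have hs := hnSnaps_quote cs id nodes h1
      have hlt : ¬ ((nodes ++ suf).length ≤ (hnSnaps (c :: cs) id nodes).length) := by
        rw [hs]; simp only [List.length_append]; omega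
      simp only [decide_eq_false hlt, Bool.false_and]
    · by_cases h2 : PySem.Chars.isalnum c = true
      · rw [hnLoopA_alnum _ _ _ _ h1 h2, hnSnaps_alnum _ _ _ h1 h2]
        exact ih _ _ _ hsuf
      · by_cases h3 : (c == ' ') = true
        · by_cases h4 : id ≠ ""
          · rw [hnLoopA_space _ _ _ _ h1 h2 h3 h4, hnSnaps_space _ _ _ h1 h2 h3 h4]
            obtain ⟨ch, suf', rfl⟩ : ∃ ch suf', suf = ch :: suf' :=
              match suf, hsuf with | ch :: suf', _ => ⟨ch, suf', rfl⟩
            rw [zipAll_cancel]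
            simp only [List.zip_cons_cons, List.zip_nil_left, List.all_cons, List.all_nil,
              Bool.and_true]
            have hsnap : hnSnaps cs id (nodes ++ [id])
                = (nodes ++ [id]) ++ hnSnaps cs id [] := by
              have := hnSnaps_acc cs id (nodes ++ [id]) []
              simpa using this
            by_cases hid : (id == ch) = true
            · rw [if_pos hid]
              have hid' : id = ch := eq_of_beq hid
              subst hid'
              by_cases hlen : suf' = []
              · subst hlen
                rw [if_pos (by simp)]
                rw [hsnap]
                have h1' : (nodes ++ [id]).length ≤ ((nodes ++ [id]) ++ hnSnaps cs id []).length := by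
                  simp only [List.length_append]; omega
                have h2' : ((nodes ++ [id]) ++ hnSnaps cs id []).take (nodes ++ [id]).length
                    = nodes ++ [id] := List.take_left
                simp only [decide_eq_true h1', h2', Bool.true_and, beq_self_eq_true]
              · have hq : 0 < suf'.length := List.length_pos_of_ne_nil hlen
                rw [if_neg (by simp only [List.length_append, List.length_cons,
                    List.length_nil, Nat.beq_eq_true_eq]; omega)]
                have hre : nodes ++ id :: suf' = (nodes ++ [id]) ++ suf' := by simp
                rw [hre]
                exact ih id (nodes ++ [id]) suf' hlen
            · rw [if_neg hid]
              have hne : id ≠ ch := fun h => hid (by simp [h])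
              have hfail : ((hnSnaps cs id (nodes ++ [id])).take (nodes ++ ch :: suf').length
                  == nodes ++ ch :: suf') = false := by
                apply beq_false_of_ne
                intro htake
                have hpre : nodes ++ ch :: suf' <+: hnSnaps cs id (nodes ++ [id]) := by
                  rw [← htake]; exact List.take_prefix _ _
                rw [hsnap, List.append_assoc, List.prefix_append_right_inj] at hpre
                rcases hpre with ⟨t, ht⟩
                have heq : id = ch := by
                  have := congrArg (fun l => l.head?) ht.symm
                  simpa using this
                exact hne heq
              simp only [hfail, Bool.and_false]
          · rw [hnLoopA_skip _ _ _ _ h1 h2 (Or.inr (by simpa using h4)),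
                hnSnaps_skip _ _ _ h1 h2 (Or.inr (by simpa using h4))]
            exact ih _ _ _ hsuf
        · rw [hnLoopA_skip _ _ _ _ h1 h2 (Or.inl h3), hnSnaps_skip _ _ _ h1 h2 (Or.inl h3)]
          exact ih _ _ _ hsuf

theorem has_node_eq (line node : String) : has_node line node = has_node_alt line node := by
  unfold has_node has_node_alt
  cases hch : PySem.Str.split₀ node with
  | nil => simp [hnLoopA_nil]
  | cons c cs =>
    have := hnLoop_key line.toList "" [] (c :: cs) (by simp)
    simp only [List.nil_append] at this
    rw [this]
    simp

-- ===== VERDICT (by name: the statement is the Claim_ definition above) =====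
theorem has_node_spec : Claim_equal_has_node := by
  intro line node _
  unfold Spec_has_node
  exact has_node_eq line node
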